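-- pv_equiv track=rewrite | github.com/hillerlab/TOGA | modules/inact_mut_check.py | get_codon_to_exon_nums
-- ===== SOURCE A (Python) =====
-- def get_codon_to_exon_nums(ref):
--     """Get codon_num -> exon_num correspondence."""
--     ref_parts = [x for x in ref.split(" ") if x]
--     prev_rem = 0
--     curr_codon = 1
--     codon_to_exon = {}
--
--     for num, exon_seq in enumerate(ref_parts, 1):
--         letters_only = [c for c in exon_seq if c.isalpha()]
--         ex_len = len(letters_only) - prev_rem
--         full_codons = ex_len // 3
--         rem = ex_len % 3
--         prev_rem = 0 if rem == 0 else 3 - rem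
--         codons_num = full_codons if rem == 0 else full_codons + 1
--         for _ in range(codons_num):
--             codon_to_exon[curr_codon] = num
--             curr_codon += 1
--     return codon_to_exon
-- ===== SOURCE B (Python) =====
-- def get_codon_to_exon_nums(ref):
--     """Get codon_num -> exon_num correspondence."""
--     counts = [sum(1 for c in part if c.isalpha()) for part in ref.split(" ") if part]
--     prefixes = []
--     total = 0
--     for c in counts:
--         total += c
--         prefixes.append(total)
--     num_codons = (total + 2) // 3
--     codon_to_exon = {}
--     for k in range(1, num_codons + 1):
--         start = 3 * (k - 1)
--         exon = 1
--         for p in prefixes: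
--             if p > start:
--                 break
--             exon += 1
--         codon_to_exon[k] = exon
--     return codon_to_exon
-- ===== Notes on version B (the rewrite author's own statement) =====
-- stated objective: alternative
-- what changed: Replaces A's stateful per-exon carry/remainder scan (which emits codons incrementally while threading prev_rem and curr_codon) with a global decomposition: per-exon letter counts and their prefix sums, num_codons = (total+2)//3, and each codon k assigned to the first exon whose letter-prefix sum exceeds the codon's start position 3*(k-1).
import Mathlib
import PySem

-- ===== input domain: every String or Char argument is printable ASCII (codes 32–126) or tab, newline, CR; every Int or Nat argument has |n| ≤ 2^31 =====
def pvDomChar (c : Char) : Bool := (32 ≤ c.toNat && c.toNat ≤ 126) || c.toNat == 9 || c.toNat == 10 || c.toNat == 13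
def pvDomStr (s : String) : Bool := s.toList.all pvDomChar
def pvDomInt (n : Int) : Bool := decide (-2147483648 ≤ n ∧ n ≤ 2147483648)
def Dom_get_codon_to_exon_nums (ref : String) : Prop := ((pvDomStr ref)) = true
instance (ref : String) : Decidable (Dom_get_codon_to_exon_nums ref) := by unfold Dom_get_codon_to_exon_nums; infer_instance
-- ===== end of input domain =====

-- B replaces A's per-exon carry/remainder scan by a global decomposition: prefix sums of
-- per-exon letter counts, num_codons = (total+2)//3, and codon k is assigned to the first
-- exon whose letter-prefix sum exceeds the codon's start position 3*(k-1) (objective: alternative).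

-- ===== PORT A =====
def aLoop : List String → Int → Int → Int → PySem.Dict Int Int → PySem.Dict Int Int
  | [], _, _, _, d => d
  | exon_seq :: rest, num, prevRem, curCodon, d =>
      let lettersOnly := exon_seq.toList.filter PySem.Chars.isalpha
      let exLen : Int := (lettersOnly.length : Int) - prevRem
      let fullCodons : Int := PySem.Int.floordiv exLen 3
      let rem : Int := PySem.Int.mod exLen 3
      let prevRem' : Int := if rem = 0 then 0 else 3 - rem
      let codonsNum : Int := if rem = 0 then fullCodons else fullCodons + 1
      let st := (PySem.List.pyRange 0 codonsNum).foldl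
          (fun (st : Int × PySem.Dict Int Int) _ => (st.1 + 1, st.2.insert st.1 num)) (curCodon, d)
      aLoop rest (num + 1) prevRem' st.1 st.2

def get_codon_to_exon_nums (ref : String) : List (Int × Int) :=
  let ref_parts := ((PySem.Str.split? ref " ").getD []).filter (fun x => x ≠ "")
  (aLoop ref_parts 1 0 1 PySem.Dict.empty).items

-- ===== PORT B =====
-- inner `for p in prefixes: if p > start: break / exon += 1`
def bFindExon (start : Int) : List Int → Int → Int
  | [], exon => exon
  | p :: ps, exon => if p > start then exon else bFindExon start ps (exon + 1)

def get_codon_to_exon_nums_alt (ref : String) : List (Int × Int) :=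
  let counts := (((PySem.Str.split? ref " ").getD []).filter (fun x => x ≠ "")).map
      (fun part => ((part.toList.filter PySem.Chars.isalpha).map (fun _ => (1 : Int))).sum)
  let st := counts.foldl (fun (st : List Int × Int) c => (st.1 ++ [st.2 + c], st.2 + c)) ([], 0)
  let prefixes := st.1
  let total := st.2
  let numCodons := PySem.Int.floordiv (total + 2) 3
  ((PySem.List.pyRange 1 (numCodons + 1)).foldl
      (fun (d : PySem.Dict Int Int) k => d.insert k (bFindExon (3 * (k - 1)) prefixes 1))
      PySem.Dict.empty).items

-- ===== PRECONDITION & SPEC =====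
def Spec_get_codon_to_exon_nums (ref : String) (out : List (Int × Int)) : Prop := out = get_codon_to_exon_nums_alt ref
instance (ref : String) (out : List (Int × Int)) : Decidable (Spec_get_codon_to_exon_nums ref out) := by unfold Spec_get_codon_to_exon_nums; infer_instance

-- ===== CLAIM (what is proved, stated in full; the proofs are below) =====
def Claim_equal_get_codon_to_exon_nums : Prop := ∀ (ref : String), Dom_get_codon_to_exon_nums ref → Spec_get_codon_to_exon_nums ref (get_codon_to_exon_nums ref)

-- ===== LEMMAS AND PROOFS =====

-- letter count of an exon part (A's form)
def pvCnt (s : String) : Int := ((s.toList.filter PySem.Chars.isalpha).length : Int)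

-- ceiling division by 3 for the prefix P of letters consumed so far
def pvCdiv (P : Int) : Int := (P + 2) / 3

-- prefixes of letter counts starting from offset P
def pvPrefixes : Int → List Int → List Int
  | _, [] => []
  | P, c :: cs => (P + c) :: pvPrefixes (P + c) cs

-- common middle form: the codon→exon list, built exon by exon
def pvG : List Int → Int → Int → List (Int × Int)
  | [], _, _ => []
  | c :: rest, P, num =>
      (PySem.List.pyRange (pvCdiv P + 1) (pvCdiv (P + c) + 1)).map (fun k => (k, num))
        ++ pvG rest (P + c) (num + 1)

lemma pv_inner (num : Int) (l : List Int) : ∀ (cur : Int) (d : PySem.Dict Int Int),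
    (∀ k ∈ d.keys, k < cur) →
    (l.foldl (fun (st : Int × PySem.Dict Int Int) _ => (st.1 + 1, st.2.insert st.1 num)) (cur, d)).1
        = cur + l.length
    ∧ (l.foldl (fun (st : Int × PySem.Dict Int Int) _ => (st.1 + 1, st.2.insert st.1 num)) (cur, d)).2.items
        = d.items ++ (PySem.List.pyRange cur (cur + l.length)).map (fun k => (k, num))
    ∧ (∀ k ∈ (l.foldl (fun (st : Int × PySem.Dict Int Int) _ => (st.1 + 1, st.2.insert st.1 num)) (cur, d)).2.keys,
        k < cur + l.length) := by
  induction l with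
  | nil =>
    intro cur d hk
    simp [PySem.List.pyRange_one_eq_nil]
    exact hk
  | cons a l ih =>
    intro cur d hk
    have hnc : d.contains cur = false := by
      rw [PySem.Dict.contains_eq_decide_mem_keys]
      simp only [decide_eq_false_iff_not]
      intro hm
      exact absurd (hk _ hm) (lt_irrefl cur)
    have hins : (d.insert cur num).items = d.items ++ [(cur, num)] :=
      PySem.Dict.items_insert_of_not_contains _ _ hnc
    have hk' : ∀ k ∈ (d.insert cur num).keys, k < cur + 1 := by
      intro k hkm
      rcases (PySem.Dict.mem_keys_insert _ _ _ _).mp hkm with h | h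
      · omega
      · have := hk _ h; omega
    obtain ⟨h1, h2, h3⟩ := ih (cur + 1) (d.insert cur num) hk'
    have hrange : PySem.List.pyRange cur (cur + ((a :: l).length : Nat)) =
        cur :: PySem.List.pyRange (cur + 1) (cur + 1 + (l.length : Nat)) := by
      have hb : cur + (((a :: l).length : Nat) : Int) = cur + 1 + ((l.length : Nat) : Int) := by
        simp; omega
      rw [PySem.List.pyRange_one_cons (by omega), hb]
    refine ⟨?_, ?_, ?_⟩
    · simp only [List.foldl_cons]
      rw [h1]; simp; omega
    · simp only [List.foldl_cons]
      rw [h2, hins, hrange]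
      simp
    · simp only [List.foldl_cons]
      intro k hkm
      have := h3 k hkm
      simp at this ⊢
      omega

lemma pv_aLoop (parts : List String) : ∀ (P : Int), 0 ≤ P → ∀ (num : Int) (d : PySem.Dict Int Int),
    (∀ k ∈ d.keys, k < pvCdiv P + 1) →
    (aLoop parts num ((-P) % 3) (pvCdiv P + 1) d).items
      = d.items ++ pvG (parts.map pvCnt) P num := by
  induction parts with
  | nil => intro P hP num d hk; simp [aLoop, pvG]
  | cons s rest ih =>
    intro P hP num d hk
    have hc : 0 ≤ pvCnt s := by unfold pvCnt; positivity
    simp only [aLoop, PySem.Int.floordiv_eq_ediv_of_pos (by norm_num : (0:Int) < 3),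
      PySem.Int.mod_eq_emod_of_pos (by norm_num : (0:Int) < 3)]
    set c := pvCnt s with hcdef
    have hcn : (if (c - (-P) % 3) % 3 = 0 then (c - (-P) % 3) / 3 else (c - (-P) % 3) / 3 + 1)
        = pvCdiv (P + c) - pvCdiv P := by
      simp only [pvCdiv]; split_ifs <;> omega
    have hcn0 : 0 ≤ pvCdiv (P + c) - pvCdiv P := by simp only [pvCdiv]; omega
    have hprev : (if (c - (-P) % 3) % 3 = 0 then (0:Int) else 3 - (c - (-P) % 3) % 3)
        = (-(P + c)) % 3 := by
      split_ifs <;> omega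
    have hraw : ((List.filter PySem.Chars.isalpha s.toList).length : Int) = c := rfl
    rw [hraw, hcn, hprev]
    obtain ⟨hst1, hst2, hst3⟩ :=
      pv_inner num (PySem.List.pyRange 0 (pvCdiv (P + c) - pvCdiv P)) (pvCdiv P + 1) d hk
    have hlen : (((PySem.List.pyRange 0 (pvCdiv (P + c) - pvCdiv P)).length : Nat) : Int)
        = pvCdiv (P + c) - pvCdiv P := by
      rw [PySem.List.length_pyRange_one]; omega
    have hcur : pvCdiv P + 1 + (((PySem.List.pyRange 0 (pvCdiv (P + c) - pvCdiv P)).length : Nat) : Int)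
        = pvCdiv (P + c) + 1 := by rw [hlen]; ring
    rw [hst1, hcur]
    have hk2 : ∀ k ∈ (List.foldl (fun st _ => (st.1 + 1, st.2.insert st.1 num)) (pvCdiv P + 1, d)
        (PySem.List.pyRange 0 (pvCdiv (P + c) - pvCdiv P))).2.keys, k < pvCdiv (P + c) + 1 := by
      intro k hkm
      have := hst3 k hkm
      omega
    rw [ih (P + c) (by omega) (num + 1) _ hk2, hst2, hcur]
    simp only [List.map_cons, pvG, ← hcdef, List.append_assoc]

lemma pv_g_eq_map (counts : List Int) : (∀ c ∈ counts, 0 ≤ c) → ∀ (P num : Int), 0 ≤ P →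
    pvG counts P num
      = (PySem.List.pyRange (pvCdiv P + 1) (pvCdiv (P + counts.sum) + 1)).map
          (fun k => (k, bFindExon (3 * (k - 1)) (pvPrefixes P counts) num)) := by
  induction counts with
  | nil =>
    intro _ P num hP
    simp [pvG, pvPrefixes, PySem.List.pyRange_one_eq_nil]
  | cons c rest ih =>
    intro hall P num hP
    have hc : 0 ≤ c := hall c (List.mem_cons_self ..)
    have hrest : ∀ x ∈ rest, 0 ≤ x := fun x hx => hall x (List.mem_cons_of_mem _ hx)
    have hsum : 0 ≤ rest.sum := List.sum_nonneg hrest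
    have h1 : pvCdiv P + 1 ≤ pvCdiv (P + c) + 1 := by unfold pvCdiv; omega
    have h2 : pvCdiv (P + c) + 1 ≤ pvCdiv (P + (c :: rest).sum) + 1 := by
      simp only [List.sum_cons, pvCdiv]; omega
    rw [PySem.List.pyRange_one_append _ _ _ h1 h2, List.map_append]
    simp only [pvG, pvPrefixes]
    congr 1
    · apply List.map_congr_left
      intro k hk
      have hb := PySem.List.mem_pyRange_one.mp hk
      have hlt : 3 * (k - 1) < P + c := by simp only [pvCdiv] at hb; omega
      simp only [bFindExon, if_pos (by omega : P + c > 3 * (k - 1))]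
    · have hstep : ∀ k ∈ PySem.List.pyRange (pvCdiv (P + c) + 1) (pvCdiv (P + (c :: rest).sum) + 1),
          (k, bFindExon (3 * (k - 1)) ((P + c) :: pvPrefixes (P + c) rest) num)
            = (k, bFindExon (3 * (k - 1)) (pvPrefixes (P + c) rest) (num + 1)) := by
        intro k hk
        have hb := PySem.List.mem_pyRange_one.mp hk
        have hge : ¬ (P + c > 3 * (k - 1)) := by simp only [pvCdiv] at hb; omega
        simp only [bFindExon, if_neg hge]
      rw [List.map_congr_left hstep]
      have hsc : P + (c :: rest).sum = (P + c) + rest.sum := by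
        simp [List.sum_cons]; ring
      rw [hsc, ih hrest (P + c) (num + 1) (by omega)]

lemma pv_bprefix (counts : List Int) : ∀ (acc : List Int) (P : Int),
    counts.foldl (fun (st : List Int × Int) c => (st.1 ++ [st.2 + c], st.2 + c)) (acc, P)
      = (acc ++ pvPrefixes P counts, P + counts.sum) := by
  induction counts with
  | nil => intro acc P; simp [pvPrefixes]
  | cons c cs ih =>
    intro acc P
    simp only [List.foldl_cons]
    rw [ih]
    simp [pvPrefixes, List.append_assoc]
    ring

-- ===== VERDICT (by name: the statement is the Claim_ definition above) =====
theorem get_codon_to_exon_nums_spec : Claim_equal_get_codon_to_exon_nums := by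
  intro ref _
  unfold Spec_get_codon_to_exon_nums get_codon_to_exon_nums get_codon_to_exon_nums_alt
  simp only []
  set parts := ((PySem.Str.split? ref " ").getD []).filter (fun x => x ≠ "") with hparts
  have hcnt : (fun part : String =>
        ((part.toList.filter PySem.Chars.isalpha).map (fun _ => (1 : Int))).sum) = pvCnt := by
    funext t
    rw [PySem.List.sum_map_const_int]
    simp [pvCnt]
  rw [hcnt]
  have hnn : ∀ c ∈ parts.map pvCnt, 0 ≤ c := by
    intro c hc
    simp only [List.mem_map] at hc
    obtain ⟨t, _, rfl⟩ := hc
    unfold pvCnt; positivity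
  -- A side
  have hA := pv_aLoop parts 0 le_rfl 1 PySem.Dict.empty (by simp [PySem.Dict.empty, PySem.Dict.keys])
  have e1 : pvCdiv 0 + 1 = (1 : Int) := by decide
  have e2 : (-(0 : Int)) % 3 = 0 := by decide
  rw [e1, e2] at hA
  rw [hA]
  -- B side
  rw [pv_bprefix (parts.map pvCnt) [] 0]
  simp only [List.nil_append, zero_add]
  have e3 : PySem.Int.floordiv ((parts.map pvCnt).sum + 2) 3 = pvCdiv (parts.map pvCnt).sum := by
    rw [PySem.Int.floordiv_eq_ediv_of_pos (by norm_num : (0:Int) < 3)]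
    rfl
  rw [e3]
  rw [PySem.Dict.items_foldl_insert_fresh
      (PySem.List.pyRange 1 (pvCdiv (parts.map pvCnt).sum + 1)) (fun a => a)
      (fun a => bFindExon (3 * (a - 1)) (pvPrefixes 0 (parts.map pvCnt)) 1) PySem.Dict.empty
      (fun a _ => PySem.Dict.contains_empty a)
      (by rw [List.map_id']; exact PySem.List.nodup_pyRange_one _ _)]
  have hB := pv_g_eq_map (parts.map pvCnt) hnn 0 1 le_rfl
  rw [e1, zero_add] at hB
  rw [hB]
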